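-- pv_equiv track=rewrite | github.com/kenbockler/Andmeteaduse_masin-ppe_projekt | PROJEKT/K10/S176/2021-11-03-17-42-24/kodu1.py | grupeeri
-- ===== SOURCE A (Python) =====
-- def sümbolite_sagedus(sõne):
--     sümbolid = list(sõne)
--     sagedused = {}
--     for sümbol in sümbolid:
--         if sümbol in sagedused:
--             sagedused[sümbol] = sagedused[sümbol] + 1
--         else:
--             sagedused[sümbol] = 1
--     return sagedused
--
-- def grupeeri(sõne):
--     sagedused = sümbolite_sagedus(sõne)
--     grupid = {}
--     vokaalid = set()
--     konsonandid = set()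
--     muud = set()
--     täishäälikud = ["a", "e", "i", "o", "u", "ö", "ä", "õ", "ü"]
--     kaashäälikud = ["b", "d", "g", "h", "j", "k", "l", "m", "n", "p", "r", "s",
--                     "t", "v", "c", "f", "q", "w", "š", "ž", "z", "x", "y"]
--     for el, sagedus in sagedused.items():
--         if el.lower() in täishäälikud:
--             vokaalid.add((el, sagedus))
--         elif el.lower() in kaashäälikud:
--             konsonandid.add((el, sagedus))
--         else:
--             muud.add((el, sagedus))
--     grupid["Täishäälikud"] = vokaalid
--     grupid["Kaashäälikud"] = konsonandid
--     grupid["Muud"] = muud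
--     return grupid
-- ===== SOURCE B (Python) =====
-- def grupeeri(sõne):
--     täishäälikud = set("aeiouöäõü")
--     kaashäälikud = set("bdghjklmnprstvcfqwšžzxy")
--     vokaalid = {}
--     konsonandid = {}
--     muud = {}
--     for el in sõne:
--         t = el.lower()
--         if t in täishäälikud:
--             d = vokaalid
--         elif t in kaashäälikud:
--             d = konsonandid
--         else:
--             d = muud
--         d[el] = d.get(el, 0) + 1
--     return {"Täishäälikud": set(vokaalid.items()),
--             "Kaashäälikud": set(konsonandid.items()),
--             "Muud": set(muud.items())}
-- ===== Notes on version B (the rewrite author's own statement) =====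
-- stated objective: alternative
-- what changed: Instead of building one global character-frequency dict and then partitioning its items into three sets, B classifies each character occurrence in a single pass and maintains three separate per-category counters, turning each category dict's items into a set at the end.
import Mathlib
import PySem

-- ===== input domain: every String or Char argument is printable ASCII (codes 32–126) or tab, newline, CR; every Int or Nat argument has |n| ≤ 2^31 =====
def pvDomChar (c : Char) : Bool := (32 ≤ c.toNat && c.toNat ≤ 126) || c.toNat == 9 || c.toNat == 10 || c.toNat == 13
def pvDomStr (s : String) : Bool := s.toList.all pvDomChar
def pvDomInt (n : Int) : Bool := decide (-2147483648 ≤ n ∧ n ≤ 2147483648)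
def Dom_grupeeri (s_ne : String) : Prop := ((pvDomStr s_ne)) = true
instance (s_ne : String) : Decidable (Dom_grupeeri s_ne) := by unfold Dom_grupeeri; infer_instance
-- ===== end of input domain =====

-- B replaces A's count-all-then-partition (one global frequency dict split into three sets)
-- by a single classify-and-count pass over the string with three per-category counters (objective: alternative).


-- ===== PORT A =====
def grupeeri_taish : List String := ["a", "e", "i", "o", "u", "ö", "ä", "õ", "ü"]
def grupeeri_kaash : List String := ["b", "d", "g", "h", "j", "k", "l", "m", "n", "p", "r", "s",
                                     "t", "v", "c", "f", "q", "w", "š", "ž", "z", "x", "y"]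

def sümbolite_sagedus (sõne : String) : PySem.Dict String Int :=
  (sõne.toList.map (fun c => String.mk [c])).foldl
    (fun d sümbol =>
      if d.contains sümbol then d.insert sümbol (d.getD sümbol 0 + 1)
      else d.insert sümbol 1)
    PySem.Dict.empty

def grupeeri (s_ne : String) : List (String × List (String × Int)) :=
  let sagedused := sümbolite_sagedus s_ne
  let st := sagedused.items.foldl
    (fun (st : PySem.Set (String × Int) × PySem.Set (String × Int) × PySem.Set (String × Int)) p =>
      if grupeeri_taish.contains (PySem.Str.lower p.1) then (PySem.Set.add st.1 p, st.2.1, st.2.2)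
      else if grupeeri_kaash.contains (PySem.Str.lower p.1) then (st.1, PySem.Set.add st.2.1 p, st.2.2)
      else (st.1, st.2.1, PySem.Set.add st.2.2 p))
    (PySem.Set.empty, PySem.Set.empty, PySem.Set.empty)
  (((PySem.Dict.empty.insert "Täishäälikud" st.1).insert "Kaashäälikud" st.2.1).insert "Muud" st.2.2).items

-- ===== PORT B =====
def grupeeri_vowelSet : PySem.Set String := PySem.Set.ofList ("aeiouöäõü".toList.map (fun c => String.mk [c]))
def grupeeri_consSet : PySem.Set String := PySem.Set.ofList ("bdghjklmnprstvcfqwšžzxy".toList.map (fun c => String.mk [c]))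

def grupeeri_alt (s_ne : String) : List (String × List (String × Int)) :=
  let st := s_ne.toList.foldl
    (fun (st : PySem.Dict String Int × PySem.Dict String Int × PySem.Dict String Int) c =>
      let el := String.mk [c]
      if PySem.Set.contains grupeeri_vowelSet (PySem.Str.lower el) then
        (st.1.insert el (st.1.getD el 0 + 1), st.2.1, st.2.2)
      else if PySem.Set.contains grupeeri_consSet (PySem.Str.lower el) then
        (st.1, st.2.1.insert el (st.2.1.getD el 0 + 1), st.2.2)
      else (st.1, st.2.1, st.2.2.insert el (st.2.2.getD el 0 + 1)))
    (PySem.Dict.empty, PySem.Dict.empty, PySem.Dict.empty)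
  [("Täishäälikud", PySem.Set.ofList st.1.items),
   ("Kaashäälikud", PySem.Set.ofList st.2.1.items),
   ("Muud", PySem.Set.ofList st.2.2.items)]

-- ===== PRECONDITION & SPEC =====
def Spec_grupeeri (s_ne : String) (out : List (String × List (String × Int))) : Prop := out = grupeeri_alt s_ne
instance (s_ne : String) (out : List (String × List (String × Int))) : Decidable (Spec_grupeeri s_ne out) := by unfold Spec_grupeeri; infer_instance

-- ===== CLAIM (what is proved, stated in full; the proofs are below) =====
def Claim_equal_grupeeri : Prop := ∀ (s_ne : String), Dom_grupeeri s_ne → Spec_grupeeri s_ne (grupeeri s_ne)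

-- ===== LEMMAS AND PROOFS =====

-- the two category predicates, on one-character strings
def pvV (x : String) : Bool := grupeeri_taish.contains (PySem.Str.lower x)
def pvK (x : String) : Bool := grupeeri_kaash.contains (PySem.Str.lower x)

-- a fold that classifies each element and updates one of three accumulators splits into three folds over filters
theorem foldl_classify3 {α β γ δ : Type} (pv pk : α → Bool)
    (f : β → α → β) (g : γ → α → γ) (h : δ → α → δ) (l : List α) (b : β) (c : γ) (d : δ) :
    l.foldl (fun st x =>
        if pv x then (f st.1 x, st.2.1, st.2.2)
        else if pk x then (st.1, g st.2.1 x, st.2.2)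
        else (st.1, st.2.1, h st.2.2 x)) (b, c, d)
    = ((l.filter pv).foldl f b,
       (l.filter (fun x => !pv x && pk x)).foldl g c,
       (l.filter (fun x => !pv x && !pk x)).foldl h d) := by
  induction l generalizing b c d with
  | nil => rfl
  | cons x xs ih =>
    by_cases hv : pv x <;> by_cases hk : pk x <;>
      simp [hv, hk, ih]

-- set(...) built by folding add commutes with filter
theorem ofList_filter {α : Type} [BEq α] [LawfulBEq α] (p : α → Bool) (xs : List α) :
    PySem.Set.ofList (xs.filter p) = (PySem.Set.ofList xs).filter p := by
  induction xs using List.reverseRecOn with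
  | nil => rfl
  | append_singleton xs x ih =>
    rw [List.filter_append, PySem.Set.ofList_append_singleton]
    by_cases hp : p x
    · have h1 : List.filter p [x] = [x] := by simp [hp]
      rw [h1, PySem.Set.ofList_append_singleton, ih]
      by_cases hm : x ∈ PySem.Set.ofList xs
      · rw [PySem.Set.add_of_mem hm, PySem.Set.add_of_mem (by simp [List.mem_filter, hm, hp])]
      · rw [PySem.Set.add_of_not_mem hm,
            PySem.Set.add_of_not_mem (by simp [List.mem_filter, hm]),
            List.filter_append]
        simp [hp]
    · have h1 : List.filter p [x] = [] := by simp [hp]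
      rw [h1, List.append_nil, ih]
      by_cases hm : x ∈ PySem.Set.ofList xs
      · rw [PySem.Set.add_of_mem hm]
      · rw [PySem.Set.add_of_not_mem hm, List.filter_append]
        simp [hp]

-- A's frequency loop is Counter(list(sõne))
theorem sagedus_eq_counter (s : String) :
    sümbolite_sagedus s = PySem.Dict.counter (s.toList.map (fun c => String.mk [c])) := by
  rw [← PySem.Dict.foldl_insert_getD_add_one_eq_counter]
  unfold sümbolite_sagedus
  congr 1
  funext d x
  by_cases h : d.contains x
  · simp [h]
  · have h' : d.contains x = false := by simpa using h
    simp [h', PySem.Dict.getD_of_not_contains]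

-- items of a Counter are nodup (keys are distinct)
theorem counter_items_nodup {α : Type} [BEq α] [LawfulBEq α] (xs : List α) :
    (PySem.Dict.counter xs).items.Nodup := by
  rw [PySem.Dict.items_counter]
  exact (PySem.Set.nodup_ofList xs).map (fun a b h => congrArg Prod.fst h)

-- folding Set.add over a nodup list disjoint from the accumulator appends it
theorem foldl_add_nodup {α : Type} [BEq α] [LawfulBEq α] (l : List α) (s : List α)
    (hnd : l.Nodup) (hdisj : ∀ x ∈ l, x ∉ s) :
    l.foldl PySem.Set.add s = s ++ l := by
  induction l generalizing s with
  | nil => simp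
  | cons x xs ih =>
    rw [List.foldl_cons, PySem.Set.add_of_not_mem (hdisj x (by simp))]
    rw [ih (s ++ [x]) (hnd.of_cons) (fun y hy => by
      simp only [List.mem_append, List.mem_singleton]
      rintro (h | rfl)
      · exact hdisj y (List.mem_cons_of_mem _ hy) h
      · exact (List.nodup_cons.mp hnd).1 hy)]
    simp

-- one category: B's per-category counter over the filtered occurrences has the same items
-- as the matching filter of A's global counter's items
theorem counter_filter_items {α : Type} [BEq α] [LawfulBEq α] (p : α → Bool) (xs : List α) :
    (PySem.Dict.counter (xs.filter p)).items
      = (PySem.Dict.counter xs).items.filter (fun q => p q.1) := by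
  rw [PySem.Dict.items_counter, PySem.Dict.items_counter, ofList_filter]
  rw [List.filter_map]
  apply List.map_congr_left
  intro k hk
  have hpk : p k := (List.mem_filter.mp hk).2
  simp [List.count_filter, hpk]

-- assembling A's result dict: three distinct literal keys append in insertion order
theorem items_three {ν : Type} (v k m : ν) :
    (((PySem.Dict.empty.insert "Täishäälikud" v).insert "Kaashäälikud" k).insert "Muud" m).items
      = [("Täishäälikud", v), ("Kaashäälikud", k), ("Muud", m)] := by
  have h2 : ((PySem.Dict.empty : PySem.Dict String ν).insert "Täishäälikud" v).contains "Kaashäälikud" = false := by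
    simp only [PySem.Dict.contains_insert, PySem.Dict.contains_empty]
    decide
  have h3 : (((PySem.Dict.empty : PySem.Dict String ν).insert "Täishäälikud" v).insert "Kaashäälikud" k).contains "Muud" = false := by
    simp only [PySem.Dict.contains_insert, PySem.Dict.contains_empty]
    decide
  rw [PySem.Dict.items_insert_of_not_contains _ m h3,
      PySem.Dict.items_insert_of_not_contains _ k h2,
      PySem.Dict.items_insert_of_not_contains _ v (by simp [PySem.Dict.contains_empty])]
  simp [show (PySem.Dict.empty : PySem.Dict String ν).items = [] from rfl]

-- ===== VERDICT (by name: the statement is the Claim_ definition above) =====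
theorem grupeeri_spec : Claim_equal_grupeeri := by
  intro s _
  unfold Spec_grupeeri grupeeri grupeeri_alt
  have hvset : grupeeri_vowelSet = grupeeri_taish := by decide
  have hkset : grupeeri_consSet = grupeeri_kaash := by decide
  simp only [hvset, hkset, PySem.Set.contains_eq_listContains]
  set xs : List String := s.toList.map (fun c => String.mk [c]) with hxs
  -- B's fold over characters is a fold over the mapped one-character strings
  have hmapfold :
      ∀ (st : PySem.Dict String Int × PySem.Dict String Int × PySem.Dict String Int),
      s.toList.foldl
        (fun st c =>
          let el := String.mk [c]
          if grupeeri_taish.contains (PySem.Str.lower el) then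
            (st.1.insert el (st.1.getD el 0 + 1), st.2.1, st.2.2)
          else if grupeeri_kaash.contains (PySem.Str.lower el) then
            (st.1, st.2.1.insert el (st.2.1.getD el 0 + 1), st.2.2)
          else (st.1, st.2.1, st.2.2.insert el (st.2.2.getD el 0 + 1))) st
      = xs.foldl
        (fun st el =>
          if pvV el then (st.1.insert el (st.1.getD el 0 + 1), st.2.1, st.2.2)
          else if pvK el then (st.1, st.2.1.insert el (st.2.1.getD el 0 + 1), st.2.2)
          else (st.1, st.2.1, st.2.2.insert el (st.2.2.getD el 0 + 1))) st := by
    intro st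
    rw [hxs, List.foldl_map]
    rfl
  rw [hmapfold]
  rw [foldl_classify3 pvV pvK
        (fun (d : PySem.Dict String Int) el => d.insert el (d.getD el 0 + 1))
        (fun (d : PySem.Dict String Int) el => d.insert el (d.getD el 0 + 1))
        (fun (d : PySem.Dict String Int) el => d.insert el (d.getD el 0 + 1)) xs]
  rw [sagedus_eq_counter]
  rw [foldl_classify3 (fun p : String × Int => grupeeri_taish.contains (PySem.Str.lower p.1))
        (fun p : String × Int => grupeeri_kaash.contains (PySem.Str.lower p.1))
        PySem.Set.add PySem.Set.add PySem.Set.add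
        (PySem.Dict.counter xs).items PySem.Set.empty PySem.Set.empty PySem.Set.empty]
  -- each of the three accumulated sets is the matching filter of the counter's items
  have hnd := counter_items_nodup xs
  have hset : ∀ p : String × Int → Bool,
      ((PySem.Dict.counter xs).items.filter p).foldl PySem.Set.add PySem.Set.empty
        = (PySem.Dict.counter xs).items.filter p := by
    intro p
    rw [foldl_add_nodup _ _ (hnd.filter p) (by simp [PySem.Set.empty])]
    simp [PySem.Set.empty]
  rw [hset, hset, hset]
  -- B's three counters over the filtered occurrences
  have hcnt : ∀ p : String → Bool,
      (xs.filter p).foldl (fun d el => d.insert el (d.getD el 0 + 1)) PySem.Dict.empty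
        = PySem.Dict.counter (xs.filter p) := by
    intro p
    rw [← PySem.Dict.foldl_insert_getD_add_one_eq_counter]
  rw [hcnt, hcnt, hcnt, counter_filter_items, counter_filter_items, counter_filter_items]
  -- the items are nodup, so Set.ofList is the identity on them
  have hof : ∀ p : String × Int → Bool,
      PySem.Set.ofList ((PySem.Dict.counter xs).items.filter p)
        = (PySem.Dict.counter xs).items.filter p := by
    intro p
    exact PySem.Set.ofList_eq_self_of_nodup _ (hnd.filter p)
  rw [hof, hof, hof]
  -- assembling the result dict of A: three fresh literal keys append in order
  rw [items_three]
  simp only [pvV, pvK]
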